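-- pv_equiv track=rewrite | github.com/isayaksh/Algorithm | BaekJoon/1074.py | solution
-- ===== SOURCE A (Python) =====
-- def solution(N, y, x):
--     answer = 0
--     quaterBoxSize = 2**((N-1)*2) # N에 해당하는 1/4 박스크기
--     halfLength = 2**(N-1) # N에 해당하는 박스 1/2 길이
--     while N > 0:
--         answer += ( quaterBoxSize * 2 * (y // halfLength) + quaterBoxSize * (x // halfLength) )
--         N, y, x = N - 1, y % halfLength, x % halfLength
--         quaterBoxSize //= 4
--         halfLength //= 2
--     return answer
-- ===== SOURCE B (Python) =====
-- def solution(N, y, x):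
--     # Z-order index: split off the top-level quadrant once, then interleave the
--     # remaining bits of the in-box coordinates bottom-up in a single bit loop.
--     if N <= 0:
--         return 0
--     q = 1 << (N - 1)
--     yh, yl = divmod(y, q)
--     xh, xl = divmod(x, q)
--     acc, bit = 0, 1
--     while yl or xl:
--         acc += bit * ((yl & 1) * 2 + (xl & 1))
--         yl >>= 1
--         xl >>= 1
--         bit <<= 2
--     return q * q * (2 * yh + xh) + acc
-- ===== Notes on version B (the rewrite author's own statement) =====
-- stated objective: faster
-- what changed: Replaces A's N-step top-down loop (one divmod per level with shrinking power-of-two box sizes) by one top-level divmod plus a single bottom-up bit-interleaving loop over the coordinate bits.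
import Mathlib
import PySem

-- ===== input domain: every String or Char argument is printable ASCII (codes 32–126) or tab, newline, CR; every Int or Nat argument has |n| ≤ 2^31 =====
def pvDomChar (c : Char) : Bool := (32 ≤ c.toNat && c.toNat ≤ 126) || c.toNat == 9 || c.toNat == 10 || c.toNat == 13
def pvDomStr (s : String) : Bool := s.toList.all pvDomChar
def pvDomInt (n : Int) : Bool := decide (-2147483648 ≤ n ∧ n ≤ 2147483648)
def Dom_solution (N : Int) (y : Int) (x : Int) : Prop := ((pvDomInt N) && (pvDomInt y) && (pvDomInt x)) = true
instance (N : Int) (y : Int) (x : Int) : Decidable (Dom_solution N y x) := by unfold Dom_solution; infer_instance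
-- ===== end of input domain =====

-- B replaces A's per-level top-down loop by one top-level divmod plus a bottom-up bit-interleaving loop (objective: faster).

-- ===== PORT A =====
-- The while loop runs exactly N.toNat times (N decreases by 1 per iteration, stops at N ≤ 0),
-- so the fuel is N.toNat and the Int N itself no longer needs to be carried.
def solutionLoopA : Nat → Int → Int → Int → Int → Int → Int
  | 0, _, _, _, _, answer => answer
  | n + 1, y, x, q, h, answer =>
      solutionLoopA n (PySem.Int.mod y h) (PySem.Int.mod x h)
        (PySem.Int.floordiv q 4) (PySem.Int.floordiv h 2)
        (answer + (q * 2 * (PySem.Int.floordiv y h) + q * (PySem.Int.floordiv x h)))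

def solution (N : Int) (y : Int) (x : Int) : Int :=
  -- For N ≤ 0 Python's 2**(negative) is a float, but the loop body never runs then and the
  -- floats are discarded; the toNat-clamped exponents are exact whenever the values are used.
  solutionLoopA N.toNat y x (2 ^ ((N - 1) * 2).toNat) (2 ^ (N - 1).toNat) 0

-- ===== PORT B =====
-- yl, xl are the divmod remainders by a positive power of two, hence nonnegative: kept as Nat.
-- The while loop halves yl and xl each step, so yl + xl bounds the iteration count and is
-- used as structural fuel; the fuel-0 branch is never reached.
def mortonLoop : Nat → Nat → Nat → Int → Int → Int
  | 0, _, _, acc, _ => acc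
  | fuel + 1, yl, xl, acc, bit =>
    if yl = 0 ∧ xl = 0 then acc
    else mortonLoop fuel (yl / 2) (xl / 2)
           (acc + bit * (((yl % 2 : Nat) : Int) * 2 + ((xl % 2 : Nat) : Int))) (bit * 4)

def solution_alt (N : Int) (y : Int) (x : Int) : Int :=
  if N ≤ 0 then 0
  else
    let q : Int := 2 ^ (N - 1).toNat
    let yh := PySem.Int.floordiv y q
    let yl := PySem.Int.mod y q
    let xh := PySem.Int.floordiv x q
    let xl := PySem.Int.mod x q
    q * q * (2 * yh + xh) + mortonLoop (yl.toNat + xl.toNat) yl.toNat xl.toNat 0 1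

-- ===== PRECONDITION & SPEC =====
def Spec_solution (N : Int) (y : Int) (x : Int) (out : Int) : Prop := out = solution_alt N y x
instance (N : Int) (y : Int) (x : Int) (out : Int) : Decidable (Spec_solution N y x out) := by unfold Spec_solution; infer_instance

-- ===== CLAIM (what is proved, stated in full; the proofs are below) =====
def Claim_equal_solution : Prop := ∀ (N : Int) (y : Int) (x : Int), Dom_solution N y x → Spec_solution N y x (solution N y x)

-- ===== LEMMAS AND PROOFS =====

-- Pure interleaving value of B's loop over the low n bits (acc/bit/fuel stripped off).
def mort : Nat → Nat → Nat → Int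
  | 0, _, _ => 0
  | n + 1, a, b => ((a % 2 : Nat) : Int) * 2 + ((b % 2 : Nat) : Int) + 4 * mort n (a / 2) (b / 2)

theorem mort_zero (n : Nat) : mort n 0 0 = 0 := by
  induction n with
  | zero => rfl
  | succ n ih => simp [mort, ih]

theorem mortonLoop_eq (f : Nat) : ∀ a b : Nat, ∀ acc bit : Int, a + b ≤ f →
    mortonLoop f a b acc bit = acc + bit * mort f a b := by
  induction f with
  | zero =>
    intro a b acc bit h
    have ha : a = 0 := by omega
    have hb : b = 0 := by omega
    subst ha; subst hb
    simp [mortonLoop, mort]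
  | succ f ih =>
    intro a b acc bit h
    rw [mortonLoop]
    split_ifs with h0
    · obtain ⟨ha, hb⟩ := h0; subst ha; subst hb
      rw [mort_zero]; ring
    · rw [ih (a / 2) (b / 2) _ _ (by omega)]
      show _ = acc + bit * (((a % 2 : Nat) : Int) * 2 + ((b % 2 : Nat) : Int) + 4 * mort f (a / 2) (b / 2))
      ring

-- mort peels the TOP bit of values below 2^(n+1).
theorem mort_top (n : Nat) : ∀ a b : Nat, a < 2 ^ (n + 1) → b < 2 ^ (n + 1) →
    mort (n + 1) a b = (4 : Int) ^ n * (2 * ((a / 2 ^ n : Nat) : Int) + ((b / 2 ^ n : Nat) : Int))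
      + mort n (a % 2 ^ n) (b % 2 ^ n) := by
  induction n with
  | zero =>
    intro a b ha hb
    interval_cases a <;> interval_cases b <;> simp [mort]
  | succ n ih =>
    intro a b ha hb
    have hP2 : (2 : Nat) ^ (n + 2) = 2 * 2 ^ (n + 1) := by ring
    have hP : (2 : Nat) ^ (n + 1) = 2 * 2 ^ n := by ring
    have ha2 : a / 2 < 2 ^ (n + 1) := by omega
    have hb2 : b / 2 < 2 ^ (n + 1) := by omega
    have hmod : ∀ c : Nat, c % 2 ^ (n + 1) = c % 2 + 2 * (c / 2 % 2 ^ n) := by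
      intro c
      rw [hP, Nat.mod_mul]
    have hdiv : ∀ c : Nat, c / 2 / 2 ^ n = c / 2 ^ (n + 1) := by
      intro c
      rw [Nat.div_div_eq_div_mul, ← hP]
    have hsplit : mort (n + 1) (a % 2 ^ (n + 1)) (b % 2 ^ (n + 1))
        = ((a % 2 : Nat) : Int) * 2 + ((b % 2 : Nat) : Int)
          + 4 * mort n (a / 2 % 2 ^ n) (b / 2 % 2 ^ n) := by
      have h1 : a % 2 ^ (n + 1) % 2 = a % 2 := by rw [hmod a]; omega
      have h2 : b % 2 ^ (n + 1) % 2 = b % 2 := by rw [hmod b]; omega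
      have h3 : a % 2 ^ (n + 1) / 2 = a / 2 % 2 ^ n := by rw [hmod a]; omega
      have h4 : b % 2 ^ (n + 1) / 2 = b / 2 % 2 ^ n := by rw [hmod b]; omega
      show ((a % 2 ^ (n + 1) % 2 : Nat) : Int) * 2 + ((b % 2 ^ (n + 1) % 2 : Nat) : Int)
          + 4 * mort n (a % 2 ^ (n + 1) / 2) (b % 2 ^ (n + 1) / 2) = _
      rw [h1, h2, h3, h4]
    have hstep : mort (n + 2) a b
        = ((a % 2 : Nat) : Int) * 2 + ((b % 2 : Nat) : Int) + 4 * mort (n + 1) (a / 2) (b / 2) := rfl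
    rw [hstep, ih (a / 2) (b / 2) ha2 hb2, hsplit, hdiv a, hdiv b]
    push_cast
    ring

-- Extra fuel beyond the bit width does not change mort.
theorem mort_succ (m : Nat) : ∀ a b : Nat, a < 2 ^ m → b < 2 ^ m → mort (m + 1) a b = mort m a b := by
  induction m with
  | zero =>
    intro a b ha hb
    interval_cases a <;> interval_cases b <;> rfl
  | succ m ih =>
    intro a b ha hb
    have hP : (2 : Nat) ^ (m + 1) = 2 * 2 ^ m := by ring
    have hstep : mort (m + 2) a b
        = ((a % 2 : Nat) : Int) * 2 + ((b % 2 : Nat) : Int) + 4 * mort (m + 1) (a / 2) (b / 2) := rfl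
    rw [hstep, ih (a / 2) (b / 2) (by omega) (by omega)]
    rfl

theorem mort_pad (n m : Nat) (hnm : n ≤ m) : ∀ a b : Nat, a < 2 ^ n → b < 2 ^ n →
    mort m a b = mort n a b := by
  induction m, hnm using Nat.le_induction with
  | base => intro a b _ _; rfl
  | succ m hm ih =>
    intro a b ha hb
    have h2 : (2 : Nat) ^ n ≤ 2 ^ m := Nat.pow_le_pow_right (by norm_num) hm
    rw [mort_succ m a b (ha.trans_le h2) (hb.trans_le h2)]
    exact ih a b ha hb

-- The Python remainder by a positive power of two, as a bounded Nat.
theorem md_nonneg (z : Int) (n : Nat) : 0 ≤ PySem.Int.mod z (2 ^ n) := by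
  rw [PySem.Int.mod_eq_emod_of_pos (by positivity)]
  exact Int.emod_nonneg _ (by positivity)

theorem md_toNat_lt (z : Int) (n : Nat) : (PySem.Int.mod z (2 ^ n)).toNat < 2 ^ n := by
  have h : PySem.Int.mod z (2 ^ n) < 2 ^ n := by
    rw [PySem.Int.mod_eq_emod_of_pos (by positivity)]
    exact Int.emod_lt_of_pos _ (by positivity)
  have : ((PySem.Int.mod z (2 ^ n)).toNat : Int) < ((2 ^ n : Nat) : Int) := by
    rw [Int.toNat_of_nonneg (md_nonneg z n)]; push_cast; exact h
  exact_mod_cast this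

theorem loopA_step (n : Nat) (y x q h acc : Int) :
    solutionLoopA (n + 1) y x q h acc
      = solutionLoopA n (PySem.Int.mod y h) (PySem.Int.mod x h)
          (PySem.Int.floordiv q 4) (PySem.Int.floordiv h 2)
          (acc + (q * 2 * (PySem.Int.floordiv y h) + q * (PySem.Int.floordiv x h))) := rfl

-- A's loop, started at level n+1 with its (exact) powers, in closed form.
theorem loopA_closed (n : Nat) : ∀ y x acc : Int,
    solutionLoopA (n + 1) y x ((4 : Int) ^ n) ((2 : Int) ^ n) acc
      = acc + (4 : Int) ^ n * (2 * PySem.Int.floordiv y (2 ^ n) + PySem.Int.floordiv x (2 ^ n))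
        + mort n (PySem.Int.mod y (2 ^ n)).toNat (PySem.Int.mod x (2 ^ n)).toNat := by
  induction n with
  | zero =>
    intro y x acc
    have h1 : ∀ z : Int, PySem.Int.floordiv z 1 = z := by
      intro z
      rw [PySem.Int.floordiv_eq_ediv_of_pos one_pos, Int.ediv_one]
    simp only [solutionLoopA, pow_zero, h1, mort]
    ring
  | succ n ih =>
    intro y x acc
    have e4 : PySem.Int.floordiv ((4 : Int) ^ (n + 1)) 4 = 4 ^ n := by
      rw [PySem.Int.floordiv_eq_ediv_of_pos (by norm_num), pow_succ]
      exact Int.mul_ediv_cancel _ (by norm_num)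
    have e2 : PySem.Int.floordiv ((2 : Int) ^ (n + 1)) 2 = 2 ^ n := by
      rw [PySem.Int.floordiv_eq_ediv_of_pos (by norm_num), pow_succ]
      exact Int.mul_ediv_cancel _ (by norm_num)
    set a : Nat := (PySem.Int.mod y (2 ^ (n + 1))).toNat with ha
    set b : Nat := (PySem.Int.mod x (2 ^ (n + 1))).toNat with hb
    have hay : ((a : Nat) : Int) = PySem.Int.mod y (2 ^ (n + 1)) := Int.toNat_of_nonneg (md_nonneg y (n + 1))
    have hbx : ((b : Nat) : Int) = PySem.Int.mod x (2 ^ (n + 1)) := Int.toNat_of_nonneg (md_nonneg x (n + 1))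
    have haK : a < 2 ^ (n + 1) := md_toNat_lt y (n + 1)
    have hbK : b < 2 ^ (n + 1) := md_toNat_lt x (n + 1)
    have hcast : ((2 ^ n : Nat) : Int) = (2 : Int) ^ n := by push_cast; ring
    have hfd : ∀ c : Nat, PySem.Int.floordiv ((c : Nat) : Int) ((2 : Int) ^ n) = ((c / 2 ^ n : Nat) : Int) := by
      intro c
      rw [← hcast]
      exact PySem.Int.floordiv_natCast c (2 ^ n)
    have hmd : ∀ c : Nat, PySem.Int.mod ((c : Nat) : Int) ((2 : Int) ^ n) = ((c % 2 ^ n : Nat) : Int) := by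
      intro c
      rw [← hcast]
      exact PySem.Int.mod_natCast c (2 ^ n)
    rw [loopA_step, e4, e2, ih]
    rw [← hay, ← hbx, hfd a, hfd b, hmd a, hmd b]
    simp only [Int.toNat_natCast]
    rw [mort_top n a b haK hbK]
    push_cast
    ring

-- ===== VERDICT (by name: the statement is the Claim_ definition above) =====
theorem solution_spec : Claim_equal_solution := by
  intro N y x _
  unfold Spec_solution solution solution_alt
  by_cases hN : N ≤ 0
  · have h0 : N.toNat = 0 := by omega
    rw [h0, if_pos hN]
    rfl
  · rw [if_neg hN]
    show solutionLoopA N.toNat y x (2 ^ ((N - 1) * 2).toNat) (2 ^ (N - 1).toNat) 0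
        = (2 : Int) ^ (N - 1).toNat * 2 ^ (N - 1).toNat
            * (2 * PySem.Int.floordiv y (2 ^ (N - 1).toNat) + PySem.Int.floordiv x (2 ^ (N - 1).toNat))
          + mortonLoop ((PySem.Int.mod y (2 ^ (N - 1).toNat)).toNat + (PySem.Int.mod x (2 ^ (N - 1).toNat)).toNat)
              (PySem.Int.mod y (2 ^ (N - 1).toNat)).toNat (PySem.Int.mod x (2 ^ (N - 1).toNat)).toNat 0 1
    set n : Nat := (N - 1).toNat with hn
    set a : Nat := (PySem.Int.mod y ((2 : Int) ^ n)).toNat with ha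
    set b : Nat := (PySem.Int.mod x ((2 : Int) ^ n)).toNat with hb
    have hNt : N.toNat = n + 1 := by omega
    have hexp : ((N - 1) * 2).toNat = 2 * n := by omega
    have h4 : (2 : Int) ^ (2 * n) = 4 ^ n := by
      rw [pow_mul]; norm_num
    have hqq : (2 : Int) ^ n * 2 ^ n = 4 ^ n := by
      rw [← pow_add, ← two_mul, h4]
    have haK : a < 2 ^ n := md_toNat_lt y n
    have hbK : b < 2 ^ n := md_toNat_lt x n
    have hpadA : mort (max n (a + b)) a b = mort n a b :=
      mort_pad n (max n (a + b)) (le_max_left _ _) a b haK hbK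
    have hpadB : mort (max n (a + b)) a b = mort (a + b) a b :=
      mort_pad (a + b) (max n (a + b)) (le_max_right _ _) a b
        (lt_of_le_of_lt (Nat.le_add_right a b) (Nat.lt_two_pow_self))
        (lt_of_le_of_lt (Nat.le_add_left b a) (Nat.lt_two_pow_self))
    rw [hNt, hexp, h4, loopA_closed n y x 0]
    rw [mortonLoop_eq (a + b) a b 0 1 le_rfl, ← hpadB, hpadA, hqq]
    ring
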